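-- pv_equiv track=rewrite | github.com/Nomio16/NLP-intelligence | eval/evaluate.py | extract_entities_from_conll
-- ===== SOURCE A (Python) =====
-- def extract_entities_from_conll(lines):
--     """
--     Extracts entities from a list of CoNLL-formatted lines for a single sentence.
--     Returns the reconstructed text and a list of entities: (type, string).
--     """
--     words = []
--     entities = []
--     current_entity_type = None
--     current_entity_words = []
--
--     for line in lines:
--         parts = line.strip().split()
--         if len(parts) < 4:
--             continue
--         word = parts[0]
--         tag = parts[-1]
--
--         words.append(word)
--
--         if tag.startswith("B-"):
--             if current_entity_type:
--                 entities.append((current_entity_type, " ".join(current_entity_words)))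
--             current_entity_type = tag[2:]
--             current_entity_words = [word]
--         elif tag.startswith("I-"):
--             if current_entity_type == tag[2:]:
--                 current_entity_words.append(word)
--             else:
--                 if current_entity_type:
--                     entities.append((current_entity_type, " ".join(current_entity_words)))
--                 current_entity_type = tag[2:]
--                 current_entity_words = [word]
--         else:
--             if current_entity_type:
--                 entities.append((current_entity_type, " ".join(current_entity_words)))
--                 current_entity_type = None
--                 current_entity_words = []
--
--     if current_entity_type:
--         entities.append((current_entity_type, " ".join(current_entity_words)))
--
--     text = " ".join(words)
--     return text, entities
-- ===== SOURCE B (Python) =====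
-- def extract_entities_from_conll(lines):
--     """
--     Extracts entities from a list of CoNLL-formatted lines for a single sentence.
--     Returns the reconstructed text and a list of entities: (type, string).
--     """
--     # pass 1: tokenize valid lines into (word, tag) pairs
--     toks = []
--     for line in lines:
--         parts = line.strip().split()
--         if len(parts) >= 4:
--             toks.append((parts[0], parts[-1]))
--     text = " ".join(w for w, _ in toks)
--
--     # pass 2: group maximal runs: a run starts at a B-/I- token whose type is
--     # non-empty, and extends over the following tokens tagged exactly "I-"+type.
--     entities = []
--     i, n = 0, len(toks)
--     while i < n:
--         w, tag = toks[i]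
--         typ = tag[2:] if tag[:2] in ("B-", "I-") else None
--         i += 1
--         if not typ:
--             continue
--         run = [w]
--         while i < n and toks[i][1] == "I-" + typ:
--             run.append(toks[i][0])
--             i += 1
--         entities.append((typ, " ".join(run)))
--     return text, entities
-- ===== Notes on version B (the rewrite author's own statement) =====
-- stated objective: alternative
-- what changed: A's single stateful loop with a flush-on-boundary accumulator is replaced by two passes: tokenize all valid lines into (word, tag) pairs once, then group maximal entity runs by detecting run starts and scanning each run's extent (takeWhile on 'I-'+type).
import Mathlib
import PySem

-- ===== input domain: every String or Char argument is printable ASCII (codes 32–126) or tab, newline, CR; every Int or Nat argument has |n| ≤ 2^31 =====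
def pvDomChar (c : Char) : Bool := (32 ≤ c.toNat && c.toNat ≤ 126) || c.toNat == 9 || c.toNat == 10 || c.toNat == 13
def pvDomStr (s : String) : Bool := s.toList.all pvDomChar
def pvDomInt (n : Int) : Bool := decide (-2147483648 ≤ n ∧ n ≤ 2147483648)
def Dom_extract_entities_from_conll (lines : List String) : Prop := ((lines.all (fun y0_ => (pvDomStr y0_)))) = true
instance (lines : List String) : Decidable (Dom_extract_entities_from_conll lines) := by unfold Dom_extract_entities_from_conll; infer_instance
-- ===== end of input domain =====

-- B replaces A's single stateful flush-accumulator loop by two passes: tokenize once,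
-- then group maximal entity runs by looking at run starts and extents (alternative decomposition, same cost).

-- ===== PORT A =====
-- pvTruthy: Python truthiness of current_entity_type (None and "" are falsy)
def pvTruthy (o : Option String) : Bool :=
  match o with
  | none => false
  | some s => !(s == "")

-- the body of A's `for line in lines` loop; state = (words, entities, current_entity_type, current_entity_words)
def pvAStep (st : List String × List (String × String) × Option String × List String)
    (line : String) : List String × List (String × String) × Option String × List String :=
  match st with
  | (words, entities, ct, cw) =>
    let parts := PySem.Str.split₀ (PySem.Str.strip line)
    if parts.length < 4 then (words, entities, ct, cw)
    else
      let word := PySem.List.pyGetD parts 0 ""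
      let tag := PySem.List.pyGetD parts (-1) ""
      let words := words ++ [word]
      if PySem.Str.startswith tag "B-" then
        ((words, (if pvTruthy ct then entities ++ [(ct.getD "", PySem.Str.join " " cw)] else entities),
          some (PySem.Str.slice tag (some 2) none), [word]))
      else if PySem.Str.startswith tag "I-" then
        (if ct = some (PySem.Str.slice tag (some 2) none) then
          (words, entities, ct, cw ++ [word])
        else
          (words, (if pvTruthy ct then entities ++ [(ct.getD "", PySem.Str.join " " cw)] else entities),
           some (PySem.Str.slice tag (some 2) none), [word]))
      else
        (if pvTruthy ct then (words, entities ++ [(ct.getD "", PySem.Str.join " " cw)], none, ([] : List String))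
         else (words, entities, ct, cw))

-- the trailing flush and `" ".join(words)` of A
def pvAFin (st : List String × List (String × String) × Option String × List String) :
    String × List (String × String) :=
  match st with
  | (words, entities, ct, cw) =>
    (PySem.Str.join " " words,
     if pvTruthy ct then entities ++ [(ct.getD "", PySem.Str.join " " cw)] else entities)

def extract_entities_from_conll (lines : List String) : String × (List (String × String)) :=
  pvAFin (lines.foldl pvAStep ([], [], none, []))

-- ===== PORT B =====
-- pass 1 of B: a valid line's (word, tag) token
def pvLineTok (line : String) : Option (String × String) :=
  let parts := PySem.Str.split₀ (PySem.Str.strip line)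
  if 4 ≤ parts.length then some (PySem.List.pyGetD parts 0 "", PySem.List.pyGetD parts (-1) "")
  else none

-- B: `tag[2:] if tag[:2] in ("B-", "I-") else None`
def pvTyp (tag : String) : Option String :=
  if PySem.Str.slice tag none (some 2) = "B-" ∨ PySem.Str.slice tag none (some 2) = "I-" then
    some (PySem.Str.slice tag (some 2) none)
  else none

-- pass 2 of B: the outer while loop; the inner `while … toks[i][1] == "I-" + typ` is the takeWhile/dropWhile split
def pvRuns : List (String × String) → List (String × String)
  | [] => []
  | (w, tag) :: rest =>
    match pvTyp tag with
    | none => pvRuns rest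
    | some t =>
      if t = "" then pvRuns rest
      else
        (t, PySem.Str.join " " (w :: (rest.takeWhile (fun p => p.2 == "I-" ++ t)).map Prod.fst))
          :: pvRuns (rest.dropWhile (fun p => p.2 == "I-" ++ t))
  termination_by toks => toks.length
  decreasing_by
  all_goals simp
  exact List.length_dropWhile_le _ _

def extract_entities_from_conll_alt (lines : List String) : String × (List (String × String)) :=
  let toks := lines.filterMap pvLineTok
  (PySem.Str.join " " (toks.map Prod.fst), pvRuns toks)

-- ===== PRECONDITION & SPEC =====
def Spec_extract_entities_from_conll (lines : List String) (out : String × (List (String × String))) : Prop := out = extract_entities_from_conll_alt lines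
instance (lines : List String) (out : String × (List (String × String))) : Decidable (Spec_extract_entities_from_conll lines out) := by unfold Spec_extract_entities_from_conll; infer_instance

-- ===== CLAIM (what is proved, stated in full; the proofs are below) =====
def Claim_equal_extract_entities_from_conll : Prop := ∀ (lines : List String), Dom_extract_entities_from_conll lines → Spec_extract_entities_from_conll lines (extract_entities_from_conll lines)

-- ===== LEMMAS AND PROOFS =====

-- the abstract pending-entity of A's state: non-truthy states carry no observable pending entity
def pvAbs (ct : Option String) (cw : List String) : Option (String × List String) :=
  match ct with
  | none => none
  | some t => if t = "" then none else some (t, cw)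

def pvMk (t : String) (w : String) : Option (String × List String) :=
  if t = "" then none else some (t, [w])

-- the entities A will still emit, as a function of the abstract pending entity and the remaining tokens
def pvE : Option (String × List String) → List (String × String) → List (String × String)
  | none, [] => []
  | some (t, cw), [] => [(t, PySem.Str.join " " cw)]
  | p, (w, tag) :: toks =>
    if PySem.Str.startswith tag "B-" then
      (match p with | none => [] | some (t, cw) => [(t, PySem.Str.join " " cw)]) ++
        pvE (pvMk (PySem.Str.slice tag (some 2) none) w) toks
    else if PySem.Str.startswith tag "I-" then
      (match p with
       | some (t, cw) =>
         if PySem.Str.slice tag (some 2) none = t then pvE (some (t, cw ++ [w])) toks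
         else (t, PySem.Str.join " " cw) :: pvE (pvMk (PySem.Str.slice tag (some 2) none) w) toks
       | none => pvE (pvMk (PySem.Str.slice tag (some 2) none) w) toks)
    else
      (match p with | none => [] | some (t, cw) => [(t, PySem.Str.join " " cw)]) ++ pvE none toks

-- A's loop body at the token level
def pvAStepT (st : List String × List (String × String) × Option String × List String)
    (tok : String × String) : List String × List (String × String) × Option String × List String :=
  match st, tok with
  | (words, entities, ct, cw), (word, tag) =>
    let words := words ++ [word]
    if PySem.Str.startswith tag "B-" then
      ((words, (if pvTruthy ct then entities ++ [(ct.getD "", PySem.Str.join " " cw)] else entities),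
        some (PySem.Str.slice tag (some 2) none), [word]))
    else if PySem.Str.startswith tag "I-" then
      (if ct = some (PySem.Str.slice tag (some 2) none) then
        (words, entities, ct, cw ++ [word])
      else
        (words, (if pvTruthy ct then entities ++ [(ct.getD "", PySem.Str.join " " cw)] else entities),
         some (PySem.Str.slice tag (some 2) none), [word]))
    else
      (if pvTruthy ct then (words, entities ++ [(ct.getD "", PySem.Str.join " " cw)], none, ([] : List String))
       else (words, entities, ct, cw))

lemma pvAStep_eq (st : List String × List (String × String) × Option String × List String)
    (line : String) :
    pvAStep st line = match pvLineTok line with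
      | none => st
      | some tok => pvAStepT st tok := by
  obtain ⟨words, entities, ct, cw⟩ := st
  simp only [pvAStep, pvLineTok, pvAStepT]
  by_cases h : (PySem.Str.split₀ (PySem.Str.strip line)).length < 4
  · rw [if_pos h, if_neg (show ¬ 4 ≤ (PySem.Str.split₀ (PySem.Str.strip line)).length by omega)]
  · rw [if_neg h, if_pos (show 4 ≤ (PySem.Str.split₀ (PySem.Str.strip line)).length by omega)]

lemma foldA_eq (lines : List String)
    (st : List String × List (String × String) × Option String × List String) :
    lines.foldl pvAStep st = (lines.filterMap pvLineTok).foldl pvAStepT st := by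
  induction lines generalizing st with
  | nil => rfl
  | cons line rest ih =>
    rw [List.foldl_cons, List.filterMap_cons, pvAStep_eq]
    cases h : pvLineTok line with
    | none => simp [ih]
    | some tok => simp [ih]

-- string facts
lemma pvString_eq_iff (s t : String) : s = t ↔ s.toList = t.toList := ⟨congrArg _, String.ext⟩

lemma pvTake2 (s : String) : (PySem.Str.slice s none (some 2)).toList = s.toList.take 2 := by
  simp [pysem]

lemma pvDrop2 (s : String) : (PySem.Str.slice s (some 2) none).toList = s.toList.drop 2 := by
  simp [pysem]

lemma pvTake2_iff (s p : String) (hp : p.toList.length = 2) :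
    PySem.Str.slice s none (some 2) = p ↔ PySem.Str.startswith s p = true := by
  rw [pvString_eq_iff, pvTake2, PySem.Str.startswith_eq, PySem.Chars.startswith_iff,
    List.prefix_iff_eq_take, hp, eq_comm]

lemma pvITag_iff (tag t : String) :
    tag = "I-" ++ t ↔ (PySem.Str.startswith tag "I-" = true ∧ PySem.Str.slice tag (some 2) none = t) := by
  have hI2 : ("I-" : String).toList = ['I', '-'] := by decide
  constructor
  · intro h
    subst h
    constructor
    · rw [← pvTake2_iff _ _ (by decide), pvString_eq_iff, pvTake2, String.toList_append, hI2]
      rfl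
    · rw [pvString_eq_iff, pvDrop2, String.toList_append, hI2]
      rfl
  · rintro ⟨h1, h2⟩
    rw [← pvTake2_iff _ _ (by decide)] at h1
    have ht : tag.toList.take 2 = ['I', '-'] := by rw [← pvTake2, h1]; decide
    have hd : tag.toList.drop 2 = t.toList := by rw [← pvDrop2, h2]
    rw [pvString_eq_iff, String.toList_append, hI2, ← ht, ← hd, List.take_append_drop]

lemma pvNotBI (tag : String) (hB : PySem.Str.startswith tag "B-" = true) :
    PySem.Str.startswith tag "I-" = false := by
  have hB2 : ("B-" : String).toList = ['B', '-'] := by decide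
  have hI2 : ("I-" : String).toList = ['I', '-'] := by decide
  rw [PySem.Str.startswith_eq, PySem.Chars.startswith_iff, hB2] at hB
  rw [PySem.Str.startswith_eq]
  by_contra h
  rw [Bool.not_eq_false, PySem.Chars.startswith_iff, hI2] at h
  rcases hB with ⟨l1, h1⟩
  rcases h with ⟨l2, h2⟩
  rw [← h2] at h1
  simp at h1

lemma pvE_cons (p : Option (String × List String)) (w tag : String) (toks : List (String × String)) :
    pvE p ((w, tag) :: toks) =
      if PySem.Str.startswith tag "B-" then
        (match p with | none => [] | some (t, cw) => [(t, PySem.Str.join " " cw)]) ++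
          pvE (pvMk (PySem.Str.slice tag (some 2) none) w) toks
      else if PySem.Str.startswith tag "I-" then
        (match p with
         | some (t, cw) =>
           if PySem.Str.slice tag (some 2) none = t then pvE (some (t, cw ++ [w])) toks
           else (t, PySem.Str.join " " cw) :: pvE (pvMk (PySem.Str.slice tag (some 2) none) w) toks
         | none => pvE (pvMk (PySem.Str.slice tag (some 2) none) w) toks)
      else
        (match p with | none => [] | some (t, cw) => [(t, PySem.Str.join " " cw)]) ++ pvE none toks := by
  cases p with
  | none => rfl
  | some q => obtain ⟨t, cw⟩ := q; rfl

-- A's fold, finalized, computes pvE of the abstract state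
lemma pvFold_inv (toks : List (String × String)) (words : List String)
    (entities : List (String × String)) (ct : Option String) (cw : List String) :
      pvAFin (toks.foldl pvAStepT (words, entities, ct, cw)) =
        (PySem.Str.join " " (words ++ toks.map Prod.fst), entities ++ pvE (pvAbs ct cw) toks) := by
  induction toks generalizing words entities ct cw with
  | nil =>
    cases ct with
    | none => simp [pvAFin, pvE, pvAbs, pvTruthy]
    | some t => by_cases ht : t = "" <;> simp [pvAFin, pvE, pvAbs, pvTruthy, ht]
  | cons tok toks ih =>
    obtain ⟨w, tag⟩ := tok
    rw [List.foldl_cons]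
    by_cases hB : PySem.Str.startswith tag "B-" = true
    · have hstep : pvAStepT (words, entities, ct, cw) (w, tag) =
          (words ++ [w],
           (if pvTruthy ct then entities ++ [(ct.getD "", PySem.Str.join " " cw)] else entities),
           some (PySem.Str.slice tag (some 2) none), [w]) := by
        simp only [pvAStepT]
        rw [if_pos hB]
      rw [hstep, ih, pvE_cons, if_pos hB]
      by_cases hX : PySem.Str.slice tag (some 2) none = ""
      all_goals cases ct with
      | none => simp [pvAbs, pvMk, pvTruthy, hX]
      | some t =>
        by_cases ht : t = "" <;>
          simp [pvAbs, pvMk, pvTruthy, ht, hX, List.append_assoc]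
    · by_cases hI : PySem.Str.startswith tag "I-" = true
      · by_cases hEq : ct = some (PySem.Str.slice tag (some 2) none)
        · have hstep : pvAStepT (words, entities, ct, cw) (w, tag) =
              (words ++ [w], entities, ct, cw ++ [w]) := by
            simp only [pvAStepT]
            rw [if_neg hB, if_pos hI, if_pos hEq]
          rw [hstep, ih, pvE_cons, if_neg hB, if_pos hI]
          subst hEq
          by_cases ht : PySem.Str.slice tag (some 2) none = "" <;>
            simp [pvAbs, pvMk, ht, List.append_assoc]
        · have hstep : pvAStepT (words, entities, ct, cw) (w, tag) =
              (words ++ [w],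
               (if pvTruthy ct then entities ++ [(ct.getD "", PySem.Str.join " " cw)] else entities),
               some (PySem.Str.slice tag (some 2) none), [w]) := by
            simp only [pvAStepT]
            rw [if_neg hB, if_pos hI, if_neg hEq]
          rw [hstep, ih, pvE_cons, if_neg hB, if_pos hI]
          by_cases hX : PySem.Str.slice tag (some 2) none = ""
          all_goals cases ct with
          | none => simp [pvAbs, pvMk, pvTruthy, hX]
          | some t =>
            have hne : ¬ PySem.Str.slice tag (some 2) none = t := fun h => hEq (by rw [h])
            by_cases ht : t = "" <;>
              simp [pvAbs, pvMk, pvTruthy, ht, hne, hX, List.append_assoc]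
      · have hstep : pvAStepT (words, entities, ct, cw) (w, tag) =
            (if pvTruthy ct then
              (words ++ [w], entities ++ [(ct.getD "", PySem.Str.join " " cw)], none, ([] : List String))
             else (words ++ [w], entities, ct, cw)) := by
          simp only [pvAStepT]
          rw [if_neg hB, if_neg hI]
        rw [hstep]
        cases ct with
        | none =>
          rw [if_neg (by simp [pvTruthy]), ih, pvE_cons, if_neg hB, if_neg hI]
          simp [pvAbs]
        | some t =>
          by_cases ht : t = ""
          · rw [if_neg (by simp [pvTruthy, ht]), ih, pvE_cons, if_neg hB, if_neg hI]
            simp [pvAbs, ht]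
          · rw [if_pos (by simp [pvTruthy, ht]), ih, pvE_cons, if_neg hB, if_neg hI]
            simp [pvAbs, ht, List.append_assoc]

lemma pvRuns_cons (w tag : String) (rest : List (String × String)) :
    pvRuns ((w, tag) :: rest) = match pvTyp tag with
      | none => pvRuns rest
      | some t =>
        if t = "" then pvRuns rest
        else
          (t, PySem.Str.join " " (w :: (rest.takeWhile (fun p => p.2 == "I-" ++ t)).map Prod.fst))
            :: pvRuns (rest.dropWhile (fun p => p.2 == "I-" ++ t)) := by
  rw [pvRuns]

lemma pvTyp_B (tag : String) (hB : PySem.Str.startswith tag "B-" = true) :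
    pvTyp tag = some (PySem.Str.slice tag (some 2) none) := by
  unfold pvTyp
  rw [if_pos (Or.inl ((pvTake2_iff tag "B-" (by decide)).mpr hB))]

lemma pvTyp_I (tag : String) (hI : PySem.Str.startswith tag "I-" = true) :
    pvTyp tag = some (PySem.Str.slice tag (some 2) none) := by
  unfold pvTyp
  rw [if_pos (Or.inr ((pvTake2_iff tag "I-" (by decide)).mpr hI))]

lemma pvTyp_O (tag : String) (hB : ¬ PySem.Str.startswith tag "B-" = true)
    (hI : ¬ PySem.Str.startswith tag "I-" = true) : pvTyp tag = none := by
  unfold pvTyp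
  rw [if_neg]
  rintro (h | h)
  · exact hB ((pvTake2_iff tag "B-" (by decide)).mp h)
  · exact hI ((pvTake2_iff tag "I-" (by decide)).mp h)

-- pvE coincides with B's run grouping
lemma pvE_main (n : ℕ) : ∀ toks : List (String × String), toks.length ≤ n →
    (pvE none toks = pvRuns toks ∧
     ∀ t cw, t ≠ "" →
       pvE (some (t, cw)) toks =
         (t, PySem.Str.join " " (cw ++ (toks.takeWhile (fun p => p.2 == "I-" ++ t)).map Prod.fst))
           :: pvRuns (toks.dropWhile (fun p => p.2 == "I-" ++ t))) := by
  induction n with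
  | zero =>
    intro toks h
    obtain rfl : toks = [] := List.eq_nil_of_length_eq_zero (Nat.le_zero.mp h)
    exact ⟨by simp [pvE, pvRuns], fun t cw ht => by simp [pvE, pvRuns]⟩
  | succ n ih =>
    intro toks h
    cases toks with
    | nil => exact ⟨by simp [pvE, pvRuns], fun t cw ht => by simp [pvE, pvRuns]⟩
    | cons tok rest =>
      obtain ⟨w, tag⟩ := tok
      have hr : rest.length ≤ n := by simp at h; omega
      obtain ⟨ihn, ihs⟩ := ih rest hr
      have key : ∀ w' tag', pvE (match pvTyp tag' with
          | none => none
          | some X => pvMk X w') rest = pvRuns ((w', tag') :: rest) := by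
        intro w' tag'
        rw [pvRuns_cons]
        cases hTyp : pvTyp tag' with
        | none => exact ihn
        | some X =>
          by_cases hX : X = ""
          · simp [pvMk, hX, ihn]
          · simp only [pvMk, if_neg hX]
            rw [ihs X [w'] hX]
            simp
      constructor
      · rw [pvE_cons]
        by_cases hB : PySem.Str.startswith tag "B-" = true
        · rw [if_pos hB]
          have hk := key w tag
          rw [pvTyp_B tag hB] at hk
          simpa using hk
        · by_cases hI : PySem.Str.startswith tag "I-" = true
          · rw [if_neg hB, if_pos hI]
            have hk := key w tag
            rw [pvTyp_I tag hI] at hk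
            exact hk
          · rw [if_neg hB, if_neg hI]
            have hk := key w tag
            rw [pvTyp_O tag hB hI] at hk
            simpa using hk
      · intro t cw ht
        rw [pvE_cons]
        by_cases hf : tag = "I-" ++ t
        · have hI : PySem.Str.startswith tag "I-" = true := ((pvITag_iff tag t).mp hf).1
          have hX : PySem.Str.slice tag (some 2) none = t := ((pvITag_iff tag t).mp hf).2
          have hB : ¬ PySem.Str.startswith tag "B-" = true := fun hBp => by
            have h := ((pvITag_iff tag t).mp hf).1
            rw [pvNotBI tag hBp] at h
            exact Bool.false_ne_true h
          rw [if_neg hB, if_pos hI]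
          simp only [if_pos hX]
          rw [ihs t (cw ++ [w]) ht]
          simp [hf]
        · have htail : (List.takeWhile (fun p => p.2 == "I-" ++ t) ((w, tag) :: rest)) = [] ∧
              (List.dropWhile (fun p => p.2 == "I-" ++ t) ((w, tag) :: rest)) = (w, tag) :: rest := by
            constructor <;> simp [hf]
          rw [htail.1, htail.2]
          by_cases hB : PySem.Str.startswith tag "B-" = true
          · rw [if_pos hB]
            have hk := key w tag
            rw [pvTyp_B tag hB] at hk
            rw [hk]
            simp
          · by_cases hI : PySem.Str.startswith tag "I-" = true
            · rw [if_neg hB, if_pos hI]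
              have hXne : ¬ PySem.Str.slice tag (some 2) none = t := fun hX =>
                hf ((pvITag_iff tag t).mpr ⟨hI, hX⟩)
              simp only [if_neg hXne]
              have hk := key w tag
              rw [pvTyp_I tag hI] at hk
              rw [hk]
              simp
            · rw [if_neg hB, if_neg hI]
              have hk := key w tag
              rw [pvTyp_O tag hB hI] at hk
              rw [hk]
              simp

-- ===== VERDICT (by name: the statement is the Claim_ definition above) =====
theorem extract_entities_from_conll_spec : Claim_equal_extract_entities_from_conll := by
  intro lines _
  unfold Spec_extract_entities_from_conll extract_entities_from_conll extract_entities_from_conll_alt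
  rw [foldA_eq]
  have h := pvFold_inv (lines.filterMap pvLineTok) [] [] none []
  rw [h]
  have h2 := (pvE_main (lines.filterMap pvLineTok).length (lines.filterMap pvLineTok) le_rfl).1
  simp [pvAbs] at h2 ⊢
  exact h2
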